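-- pv_equiv track=rewrite | github.com/lotemashkenazy/Git_Start | 5.9/Q1-7.py | matrix_by_diff
-- ===== SOURCE A (Python) =====
-- def matrix_by_diff(size):
--     sum = 0
--     matrix = []
--     lst = []
--     for row in range(size):
--         for col in range(size):
--             sum = row - col
--             if sum < 0:
--                 sum = 0
--             lst.append(sum)
--         matrix.append(lst)
--         lst = []
--
--     return matrix
-- ===== SOURCE B (Python) =====
-- def matrix_by_diff(size):
--     return [list(range(row, 0, -1)) + [0] * (size - row) for row in range(size)]
-- ===== Notes on version B (the rewrite author's own statement) =====
-- stated objective: simpler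
-- what changed: Each row is constructed directly as the descending run from the row index down to one, padded with zeros, eliminating the inner column loop and the clamp test of A.
import Mathlib
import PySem

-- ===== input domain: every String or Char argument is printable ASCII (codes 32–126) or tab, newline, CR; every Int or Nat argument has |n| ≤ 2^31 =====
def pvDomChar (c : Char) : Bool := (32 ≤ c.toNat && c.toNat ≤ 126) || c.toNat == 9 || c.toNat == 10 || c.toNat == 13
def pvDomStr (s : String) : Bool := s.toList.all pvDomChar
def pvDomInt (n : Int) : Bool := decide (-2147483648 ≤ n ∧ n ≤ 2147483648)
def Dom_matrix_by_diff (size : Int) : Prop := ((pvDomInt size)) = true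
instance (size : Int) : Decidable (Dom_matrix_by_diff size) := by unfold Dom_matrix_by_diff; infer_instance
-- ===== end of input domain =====

-- B builds each row directly as the descending run [row..1] padded with zeros (simpler: no inner loop, no clamp).

-- ===== PORT A =====
-- state = (sum, matrix, lst), exactly A's three mutable variables
def matrix_by_diff (size : Int) : List (List Int) :=
  let init : Int × List (List Int) × List Int := (0, [], [])
  let res := (PySem.List.pyRange 0 size 1).foldl
    (fun st row =>
      let st2 := (PySem.List.pyRange 0 size 1).foldl
        (fun (st : Int × List (List Int) × List Int) col =>
          let s := row - col
          let s := if s < 0 then 0 else s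
          (s, st.2.1, st.2.2 ++ [s])) st
      (st2.1, st2.2.1 ++ [st2.2.2], ([] : List Int))) init
  res.2.1

-- ===== PORT B =====
def matrix_by_diff_alt (size : Int) : List (List Int) :=
  (PySem.List.pyRange 0 size 1).map
    (fun row => PySem.List.pyRange row 0 (-1) ++ List.replicate (size - row).toNat 0)

-- ===== PRECONDITION & SPEC =====
def Spec_matrix_by_diff (size : Int) (out : List (List Int)) : Prop := out = matrix_by_diff_alt size
instance (size : Int) (out : List (List Int)) : Decidable (Spec_matrix_by_diff size out) := by unfold Spec_matrix_by_diff; infer_instance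

-- ===== CLAIM (what is proved, stated in full; the proofs are below) =====
def Claim_equal_matrix_by_diff : Prop := ∀ (size : Int), Dom_matrix_by_diff size → Spec_matrix_by_diff size (matrix_by_diff size)

-- ===== LEMMAS AND PROOFS =====

-- A's clamp, named for the proofs
def pvClamp (row col : Int) : Int := if row - col < 0 then 0 else row - col

-- inner loop: appends pvClamp row c for each c, threads sum, leaves matrix alone
theorem pv_inner (row : Int) (l : List Int) (s : Int) (M : List (List Int)) (acc : List Int) :
    l.foldl
        (fun (st : Int × List (List Int) × List Int) col =>
          let s := row - col
          let s := if s < 0 then 0 else s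
          (s, st.2.1, st.2.2 ++ [s])) (s, M, acc)
      = (l.foldl (fun _ c => pvClamp row c) s, M, acc ++ l.map (pvClamp row)) := by
  induction l generalizing s acc with
  | nil => simp
  | cons c l ih =>
    simp only [List.foldl_cons, ih]
    simp [pvClamp]

-- outer loop: appends one row (the inner map) per iteration
theorem pv_outer (size : Int) (l : List Int) (s : Int) (M : List (List Int)) :
    l.foldl
        (fun st row =>
          let st2 := (PySem.List.pyRange 0 size 1).foldl
            (fun (st : Int × List (List Int) × List Int) col =>
              let s := row - col
              let s := if s < 0 then 0 else s
              (s, st.2.1, st.2.2 ++ [s])) st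
          (st2.1, st2.2.1 ++ [st2.2.2], ([] : List Int))) (s, M, [])
      = (l.foldl (fun s row => (PySem.List.pyRange 0 size 1).foldl (fun _ c => pvClamp row c) s) s,
         M ++ l.map (fun row => (PySem.List.pyRange 0 size 1).map (pvClamp row)), []) := by
  induction l generalizing s M with
  | nil => simp
  | cons r l ih =>
    simp only [List.foldl_cons, pv_inner, ih]
    simp

-- one row of A equals one row of B, for 0 ≤ row < size
theorem pv_row (size row : Int) (h0 : 0 ≤ row) (h1 : row < size) :
    (PySem.List.pyRange 0 size 1).map (pvClamp row)
      = PySem.List.pyRange row 0 (-1) ++ List.replicate (size - row).toNat 0 := by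
  rw [PySem.List.pyRange_one_append 0 row size h0 (le_of_lt h1), List.map_append]
  congr 1
  · rw [PySem.List.pyRange_one, PySem.List.pyRange_neg_one, List.map_map]
    simp only [Int.sub_zero]
    refine List.map_congr_left ?_
    intro k hk
    rw [List.mem_range] at hk
    have hk' : (k : Int) < row := by
      have := Int.toNat_of_nonneg h0
      omega
    simp only [Function.comp_apply, pvClamp]
    split <;> omega
  · have : ∀ c ∈ PySem.List.pyRange row size 1, pvClamp row c = 0 := by
      intro c hc
      rw [PySem.List.mem_pyRange_one] at hc
      simp only [pvClamp]
      split <;> omega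
    rw [List.map_congr_left this, List.map_const', PySem.List.length_pyRange_one]

-- ===== VERDICT (by name: the statement is the Claim_ definition above) =====
theorem matrix_by_diff_spec : Claim_equal_matrix_by_diff := by
  intro size _
  unfold Spec_matrix_by_diff matrix_by_diff matrix_by_diff_alt
  simp only [pv_outer, List.nil_append]
  refine List.map_congr_left ?_
  intro row hrow
  rw [PySem.List.mem_pyRange_one] at hrow
  exact pv_row size row hrow.1 hrow.2
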